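-- pv_equiv track=rewrite | github.com/Antonio-Tresol/intro-to-programming-with-python-evals | validation/validate_physics_chemistry.py | validar_balanceo
-- ===== SOURCE A (Python) =====
-- from typing import List, Dict, Any, Tuple
-- from typing import List, Dict, Tuple
--
-- def validar_balanceo(
--     reactantes: List[Tuple[int, str]],
--     productos: List[Tuple[int, str]],
--     moleculas_db: Dict[str, Dict[str, int]]
-- ) -> bool:
--     """
--     Verifica si una ecuación química está balanceada contando los átomos
--     de cada elemento en ambos lados.
--     """
--     conteo_reactantes: Dict[str, int] = {}
--     conteo_productos: Dict[str, int] = {}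
--
--     # Procesa una lista (reactantes o productos) y actualiza su diccionario de conteo
--     def contar_atomos(lista_terminos, conteo_final):
--         for coeficiente, formula in lista_terminos:
--             if formula in moleculas_db:
--                 for elemento, cantidad in moleculas_db[formula].items():
--                     conteo_final[elemento] = conteo_final.get(elemento, 0) + cantidad * coeficiente
--
--     contar_atomos(reactantes, conteo_reactantes)
--     contar_atomos(productos, conteo_productos)
--
--     return conteo_reactantes == conteo_productos
-- ===== SOURCE B (Python) =====
-- def validar_balanceo(reactantes, productos, moleculas_db):
--     def contribuciones(terminos):
--         return [(elemento, cantidad * coeficiente)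
--                 for coeficiente, formula in terminos if formula in moleculas_db
--                 for elemento, cantidad in moleculas_db[formula].items()]
--     izq = contribuciones(reactantes)
--     der = contribuciones(productos)
--     elems_izq = list(dict.fromkeys(e for e, _ in izq))
--     elems_der = list(dict.fromkeys(e for e, _ in der))
--     return set(elems_izq) == set(elems_der) and all(
--         sum(d for e, d in izq if e == x) == sum(d for e, d in der if e == x)
--         for x in elems_izq)
-- ===== Notes on version B (the rewrite author's own statement) =====
-- stated objective: alternative
-- what changed: B replaces A's mutable dict accumulators with a flat list of (element, delta) contributions per side, returning element-set equality plus per-element filtered sums, so no counting dicts are built or compared.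
import Mathlib
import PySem

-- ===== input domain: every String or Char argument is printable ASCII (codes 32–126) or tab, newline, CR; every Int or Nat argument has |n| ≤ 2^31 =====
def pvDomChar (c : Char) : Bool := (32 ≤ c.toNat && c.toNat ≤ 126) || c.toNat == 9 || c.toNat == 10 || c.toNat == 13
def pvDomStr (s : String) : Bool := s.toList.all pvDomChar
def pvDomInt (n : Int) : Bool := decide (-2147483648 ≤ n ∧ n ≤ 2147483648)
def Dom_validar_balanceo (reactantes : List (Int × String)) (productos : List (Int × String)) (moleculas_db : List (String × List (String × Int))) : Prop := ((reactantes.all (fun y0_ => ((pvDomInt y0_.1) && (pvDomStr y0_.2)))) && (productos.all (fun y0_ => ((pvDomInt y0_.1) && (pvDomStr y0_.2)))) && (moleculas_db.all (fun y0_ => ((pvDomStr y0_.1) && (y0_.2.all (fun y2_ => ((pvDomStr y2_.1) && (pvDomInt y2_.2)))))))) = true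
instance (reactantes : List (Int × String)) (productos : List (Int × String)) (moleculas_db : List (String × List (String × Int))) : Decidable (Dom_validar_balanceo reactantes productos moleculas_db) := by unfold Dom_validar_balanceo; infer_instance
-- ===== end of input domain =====

-- B replaces A's mutable dict accumulators with flat (element, delta) contribution lists,
-- compared by element-set equality and per-element filtered sums ("alternative": different
-- decomposition, same behaviour, not claimed faster).

-- ===== PORT A =====
-- the Python dict moleculas_db, built from the association list (duplicate keys: first position, last value)
def pvDbOf (moleculas_db : List (String × List (String × Int))) : PySem.Dict String (PySem.Dict String Int) :=
  PySem.Dict.ofList (moleculas_db.map (fun p => (p.1, PySem.Dict.ofList p.2)))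

-- hand port of Python's 'dict1 == dict2' (order-insensitive map equality; exact for unique-key dicts)
def pvDictEq (d1 d2 : PySem.Dict String Int) : Bool :=
  d1.items.length == d2.items.length && d1.items.all (fun p => d2.get? p.1 == some p.2)

-- the inner helper contar_atomos (mutating loop → foldl over the same state)
def contar_atomos (db : PySem.Dict String (PySem.Dict String Int))
    (lista_terminos : List (Int × String)) (conteo_final : PySem.Dict String Int) :
    PySem.Dict String Int :=
  lista_terminos.foldl
    (fun cf t =>
      if db.contains t.2 then
        (db.getD t.2 PySem.Dict.empty).items.foldl
          (fun cf2 q => cf2.insert q.1 (cf2.getD q.1 0 + q.2 * t.1)) cf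
      else cf)
    conteo_final

def validar_balanceo (reactantes : List (Int × String)) (productos : List (Int × String)) (moleculas_db : List (String × List (String × Int))) : Bool :=
  let db := pvDbOf moleculas_db
  let conteo_reactantes := contar_atomos db reactantes PySem.Dict.empty
  let conteo_productos := contar_atomos db productos PySem.Dict.empty
  pvDictEq conteo_reactantes conteo_productos

-- ===== PORT B =====
-- flat list of (element, delta) contributions of one side
def contribuciones (db : PySem.Dict String (PySem.Dict String Int))
    (terminos : List (Int × String)) : List (String × Int) :=
  terminos.flatMap (fun t =>
    if db.contains t.2 then
      (db.getD t.2 PySem.Dict.empty).items.map (fun q => (q.1, q.2 * t.1))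
    else [])

def validar_balanceo_alt (reactantes : List (Int × String)) (productos : List (Int × String)) (moleculas_db : List (String × List (String × Int))) : Bool :=
  let db := pvDbOf moleculas_db
  let izq := contribuciones db reactantes
  let der := contribuciones db productos
  let elems_izq := PySem.Set.ofList (izq.map (·.1))
  let elems_der := PySem.Set.ofList (der.map (·.1))
  -- set(elems_izq) == set(elems_der): mutual containment (exact hand port of set equality)
  (elems_izq.all (fun e => elems_der.contains e) && elems_der.all (fun e => elems_izq.contains e)) &&
    elems_izq.all (fun x =>
      ((izq.filter (fun p => p.1 == x)).map (·.2)).sum ==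
      ((der.filter (fun p => p.1 == x)).map (·.2)).sum)

-- ===== PRECONDITION & SPEC =====
def Spec_validar_balanceo (reactantes : List (Int × String)) (productos : List (Int × String)) (moleculas_db : List (String × List (String × Int))) (out : Bool) : Prop := out = validar_balanceo_alt reactantes productos moleculas_db
instance (reactantes : List (Int × String)) (productos : List (Int × String)) (moleculas_db : List (String × List (String × Int))) (out : Bool) : Decidable (Spec_validar_balanceo reactantes productos moleculas_db out) := by unfold Spec_validar_balanceo; infer_instance

-- ===== CLAIM (what is proved, stated in full; the proofs are below) =====
def Claim_equal_validar_balanceo : Prop := ∀ (reactantes : List (Int × String)) (productos : List (Int × String)) (moleculas_db : List (String × List (String × Int))), Dom_validar_balanceo reactantes productos moleculas_db → Spec_validar_balanceo reactantes productos moleculas_db (validar_balanceo reactantes productos moleculas_db)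

-- ===== LEMMAS AND PROOFS =====

-- the accumulation step both counting loops perform, as a single function
def pvStep (d : PySem.Dict String Int) (p : String × Int) : PySem.Dict String Int :=
  d.insert p.1 (d.getD p.1 0 + p.2)

-- A's nested counting loop is a fold of pvStep over B's flat contribution list
lemma contar_eq_foldl (db : PySem.Dict String (PySem.Dict String Int)) :
    ∀ (l : List (Int × String)) (c : PySem.Dict String Int),
      contar_atomos db l c = (contribuciones db l).foldl pvStep c := by
  intro l
  induction l with
  | nil => intro c; rfl
  | cons t l ih =>
    intro c
    simp only [contar_atomos, contribuciones, List.foldl_cons, List.flatMap_cons,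
      List.foldl_append] at *
    by_cases h : db.contains t.2
    · simp only [h, if_true, List.foldl_map]
      exact ih _
    · simp only [h, Bool.false_eq_true, if_false, List.foldl_nil]
      exact ih _

lemma getD_foldl_step :
    ∀ (l : List (String × Int)) (d : PySem.Dict String Int) (e : String),
      (l.foldl pvStep d).getD e 0
        = d.getD e 0 + ((l.filter (fun p => p.1 == e)).map (·.2)).sum := by
  intro l
  induction l with
  | nil => simp
  | cons p l ih =>
    intro d e
    by_cases h : p.1 = e
    · subst h
      simp only [List.foldl_cons, ih, List.filter_cons, beq_self_eq_true, if_true,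
        List.map_cons, List.sum_cons, pvStep, PySem.Dict.getD_insert]
      ring
    · have hb : (p.1 == e) = false := by simp [h]
      simp only [List.foldl_cons, ih, List.filter_cons, hb, Bool.false_eq_true, if_false,
        pvStep, PySem.Dict.getD_insert]
      rw [if_neg (fun he => h he.symm)]

lemma mem_keys_foldl_step :
    ∀ (l : List (String × Int)) (d : PySem.Dict String Int) (e : String),
      e ∈ (l.foldl pvStep d).keys ↔ e ∈ d.keys ∨ e ∈ l.map (·.1) := by
  intro l
  induction l with
  | nil => simp
  | cons p l ih =>
    intro d e
    simp only [List.foldl_cons, ih, pvStep, PySem.Dict.mem_keys_insert, List.map_cons,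
      List.mem_cons]
    tauto

lemma nodup_keys_foldl_step :
    ∀ (l : List (String × Int)) (d : PySem.Dict String Int),
      d.keys.Nodup → (l.foldl pvStep d).keys.Nodup := by
  intro l
  induction l with
  | nil => intro d h; exact h
  | cons p l ih =>
    intro d h
    exact ih _ (PySem.Dict.nodup_keys_insert _ _ _ h)

-- Python's dict == (as ported in pvDictEq) characterised by key membership and values
lemma pvDictEq_iff (d1 d2 : PySem.Dict String Int)
    (h1 : d1.keys.Nodup) (h2 : d2.keys.Nodup) :
    pvDictEq d1 d2 = true ↔
      ((∀ e, e ∈ d1.keys ↔ e ∈ d2.keys) ∧ ∀ e ∈ d1.keys, d1.getD e 0 = d2.getD e 0) := by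
  have hk1 : d1.keys = d1.items.map (·.1) := rfl
  have hk2 : d2.keys = d2.items.map (·.1) := rfl
  constructor
  · intro h
    unfold pvDictEq at h
    simp only [Bool.and_eq_true, beq_iff_eq, List.all_eq_true] at h
    obtain ⟨hlen, hall⟩ := h
    have hsub : ∀ e ∈ d1.keys, e ∈ d2.keys ∧ d1.getD e 0 = d2.getD e 0 := by
      intro e he
      rw [hk1, List.mem_map] at he
      obtain ⟨q, hq, hqe⟩ := he
      have hg : d2.get? q.1 = some q.2 := by simpa using hall q hq
      have hmem2 : q.1 ∈ d2.keys := by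
        by_contra hc
        rw [← PySem.Dict.get?_eq_none_iff_not_mem_keys] at hc
        simp [hc] at hg
      have hv1 : d1.getD q.1 0 = q.2 := PySem.Dict.getD_of_mem_items _ hq h1 0
      have hv2 : d2.getD q.1 0 = q.2 := PySem.Dict.getD_of_get?_eq_some _ _ hg
      subst hqe
      exact ⟨hmem2, by rw [hv1, hv2]⟩
    have hcard : d1.keys.length = d2.keys.length := by
      rw [hk1, hk2, List.length_map, List.length_map, hlen]
    have hfin : d1.keys.toFinset = d2.keys.toFinset := by
      apply Finset.eq_of_subset_of_card_le
      · intro e he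
        rw [List.mem_toFinset] at he ⊢
        exact (hsub e he).1
      · rw [List.toFinset_card_of_nodup h1, List.toFinset_card_of_nodup h2, hcard]
    refine ⟨fun e => ?_, fun e he => (hsub e he).2⟩
    rw [← List.mem_toFinset, ← List.mem_toFinset (l := d2.keys), hfin]
  · rintro ⟨hmem, hval⟩
    have hfin : d1.keys.toFinset = d2.keys.toFinset := by
      ext e
      simp only [List.mem_toFinset]
      exact hmem e
    unfold pvDictEq
    simp only [Bool.and_eq_true, beq_iff_eq, List.all_eq_true]
    constructor
    · have : d1.keys.length = d2.keys.length := by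
        rw [← List.toFinset_card_of_nodup h1, ← List.toFinset_card_of_nodup h2, hfin]
      rw [hk1, hk2, List.length_map, List.length_map] at this
      exact this
    · intro q hq
      have he1 : q.1 ∈ d1.keys := by rw [hk1, List.mem_map]; exact ⟨q, hq, rfl⟩
      have he2 : q.1 ∈ d2.keys := (hmem q.1).1 he1
      have hv1 : d1.getD q.1 0 = q.2 := PySem.Dict.getD_of_mem_items _ hq h1 0
      obtain ⟨w, hw⟩ : ∃ w, d2.get? q.1 = some w := by
        by_contra hc
        push Not at hc
        have : d2.get? q.1 = none := by
          cases hg : d2.get? q.1 with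
          | none => rfl
          | some w => exact absurd hg (hc w)
        rw [PySem.Dict.get?_eq_none_iff_not_mem_keys] at this
        exact this he2
      have hv2 : d2.getD q.1 0 = w := PySem.Dict.getD_of_get?_eq_some _ _ hw
      have : w = q.2 := by rw [← hv2, ← hval q.1 he1, hv1]
      simp [hw, this]

-- ===== VERDICT (by name: the statement is the Claim_ definition above) =====
theorem validar_balanceo_spec : Claim_equal_validar_balanceo := by
  intro reactantes productos moleculas_db _
  show validar_balanceo reactantes productos moleculas_db
      = validar_balanceo_alt reactantes productos moleculas_db
  simp only [validar_balanceo, validar_balanceo_alt]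
  rw [contar_eq_foldl, contar_eq_foldl]
  set db := pvDbOf moleculas_db
  set izq := contribuciones db reactantes with hizq
  set der := contribuciones db productos with hder
  have hn1 := nodup_keys_foldl_step izq PySem.Dict.empty (by simp)
  have hn2 := nodup_keys_foldl_step der PySem.Dict.empty (by simp)
  rw [Bool.eq_iff_iff, pvDictEq_iff _ _ hn1 hn2]
  have hmem1 : ∀ e, e ∈ (izq.foldl pvStep PySem.Dict.empty).keys ↔ e ∈ izq.map (·.1) := by
    intro e; rw [mem_keys_foldl_step]; simp
  have hmem2 : ∀ e, e ∈ (der.foldl pvStep PySem.Dict.empty).keys ↔ e ∈ der.map (·.1) := by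
    intro e; rw [mem_keys_foldl_step]; simp
  have hget1 : ∀ e, (izq.foldl pvStep PySem.Dict.empty).getD e 0
      = ((izq.filter (fun p => p.1 == e)).map (·.2)).sum := by
    intro e; rw [getD_foldl_step]; simp
  have hget2 : ∀ e, (der.foldl pvStep PySem.Dict.empty).getD e 0
      = ((der.filter (fun p => p.1 == e)).map (·.2)).sum := by
    intro e; rw [getD_foldl_step]; simp
  simp only [Bool.and_eq_true, List.all_eq_true, PySem.Set.mem_ofList, beq_iff_eq,
    PySem.Set.contains_iff, hmem1, hmem2, hget1, hget2]
  constructor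
  · rintro ⟨hm, hv⟩
    exact ⟨⟨fun e he => (hm e).1 he, fun e he => (hm e).2 he⟩, hv⟩
  · rintro ⟨⟨hs1, hs2⟩, hv⟩
    exact ⟨fun e => ⟨hs1 e, hs2 e⟩, hv⟩
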